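-- pv_equiv track=rewrite | github.com/crystalattice/Algorithms_and_Interviews | Chapter 15/cops_vs_thieves.py | cops_and_robbers
-- ===== SOURCE A (Python) =====
-- def cops_and_robbers(array, distance):
--     i = 0
--     thief_index = 0
--     cop_index = 0
--     result = 0
--     array_length = len(array)
--     thief_count = []
--     cop_count = []
--
--     # Store indices in list
--     while i < array_length:
--         if array[i] == "COP":
--             cop_count.append(i)
--         elif array[i] == "THIEF":
--             thief_count.append(i)
--         i += 1
--
--     # Track lowest current indices
--     while thief_index < len(thief_count) and cop_index < len(cop_count):
--         if (abs(thief_count[thief_index] - cop_count[cop_index]) <= distance):  # Thief can be caught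
--             result += 1
--             thief_index += 1
--             cop_index += 1
--         elif thief_count[thief_index] < cop_count[cop_index]:   # Increment the minimum index
--             thief_index += 1
--         else:
--             cop_index += 1
--
--     return result
-- ===== SOURCE B (Python) =====
-- def cops_and_robbers(array, distance):
--     cops = []
--     thieves = []
--     result = 0
--     for i, s in enumerate(array):
--         if s == "COP":
--             while thieves and thieves[0] < i - distance:
--                 thieves.pop(0)
--             if thieves:
--                 thieves.pop(0)
--                 result += 1
--             else:
--                 cops.append(i)
--         elif s == "THIEF":
--             while cops and cops[0] < i - distance:
--                 cops.pop(0)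
--             if cops:
--                 cops.pop(0)
--                 result += 1
--             else:
--                 thieves.append(i)
--     return result
-- ===== Notes on version B (the rewrite author's own statement) =====
-- stated objective: alternative
-- what changed: Replaces A's two-phase method (build full cop/thief index lists, then a two-pointer while loop over them) with a single pass over the array that keeps queues of unmatched cop and thief positions, pruning stale positions and matching on the fly.
import Mathlib
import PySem

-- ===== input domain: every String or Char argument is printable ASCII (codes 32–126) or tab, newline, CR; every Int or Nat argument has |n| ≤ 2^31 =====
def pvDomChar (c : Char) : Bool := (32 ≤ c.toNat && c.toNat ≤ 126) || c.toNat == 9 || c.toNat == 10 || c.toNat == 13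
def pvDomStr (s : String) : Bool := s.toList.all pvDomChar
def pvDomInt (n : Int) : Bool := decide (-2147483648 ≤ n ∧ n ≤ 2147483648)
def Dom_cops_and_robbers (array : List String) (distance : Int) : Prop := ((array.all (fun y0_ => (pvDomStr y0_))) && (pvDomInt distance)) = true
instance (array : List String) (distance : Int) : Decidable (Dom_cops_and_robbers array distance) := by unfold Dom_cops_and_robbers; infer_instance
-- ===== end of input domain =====

-- B replaces A's two-phase build-index-lists-then-two-pointer scan by a single pass
-- over the array keeping queues of unmatched cop/thief positions (alternative, same asymptotic cost).

-- ===== PORT A =====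
-- first while loop of A: collect indices of "COP" and "THIEF"
def copsScanA (array : List String) (fuel : Nat) (i : Nat) (tc cc : List Int) : List Int × List Int :=
  match fuel with
  | 0 => (tc, cc)
  | fuel + 1 =>
    if h : i < array.length then
      if array[i] = "COP" then copsScanA array fuel (i + 1) tc (cc ++ [(i : Int)])
      else if array[i] = "THIEF" then copsScanA array fuel (i + 1) (tc ++ [(i : Int)]) cc
      else copsScanA array fuel (i + 1) tc cc
    else (tc, cc)

-- second while loop of A: two-pointer match on the index lists
def matchA (distance : Int) (tc cc : List Int) (fuel : Nat) (ti ci : Nat) (result : Int) : Int :=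
  match fuel with
  | 0 => result
  | fuel + 1 =>
    if h : ti < tc.length ∧ ci < cc.length then
      if |tc[ti] - cc[ci]| ≤ distance then matchA distance tc cc fuel (ti + 1) (ci + 1) (result + 1)
      else if tc[ti] < cc[ci] then matchA distance tc cc fuel (ti + 1) ci result
      else matchA distance tc cc fuel ti (ci + 1) result
    else result

def cops_and_robbers (array : List String) (distance : Int) : Int :=
  let p := copsScanA array array.length 0 [] []
  matchA distance p.1 p.2 (p.1.length + p.2.length) 0 0 0

-- ===== PORT B =====
-- one step of B's for-loop; state = (cops queue, thieves queue, result);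
-- B's `while q and q[0] < i - distance: q.pop(0)` is exactly dropWhile on the queue
def stepB (distance : Int) (st : List Int × List Int × Int) (p : Int × String) : List Int × List Int × Int :=
  let cops := st.1
  let thieves := st.2.1
  let result := st.2.2
  let i := p.1
  if p.2 = "COP" then
    let thieves := thieves.dropWhile (fun t => t < i - distance)
    match thieves with
    | _ :: rest => (cops, rest, result + 1)
    | [] => (cops ++ [i], [], result)
  else if p.2 = "THIEF" then
    let cops := cops.dropWhile (fun c => c < i - distance)
    match cops with
    | _ :: rest => (rest, thieves, result + 1)
    | [] => ([], thieves ++ [i], result)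
  else (cops, thieves, result)

def cops_and_robbers_alt (array : List String) (distance : Int) : Int :=
  ((PySem.List.enumerate array 0).foldl (stepB distance) ([], [], 0)).2.2

-- ===== PRECONDITION & SPEC =====
def Spec_cops_and_robbers (array : List String) (distance : Int) (out : Int) : Prop := out = cops_and_robbers_alt array distance
instance (array : List String) (distance : Int) (out : Int) : Decidable (Spec_cops_and_robbers array distance out) := by unfold Spec_cops_and_robbers; infer_instance

-- ===== CLAIM (what is proved, stated in full; the proofs are below) =====
def Claim_equal_cops_and_robbers : Prop := ∀ (array : List String) (distance : Int), Dom_cops_and_robbers array distance → Spec_cops_and_robbers array distance (cops_and_robbers array distance)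

-- ===== LEMMAS AND PROOFS =====

-- reference greedy match on the two (sorted) index lists
def m2 (d : Int) : List Int → List Int → Int
  | [], _ => 0
  | _ :: _, [] => 0
  | t :: ts, c :: cs =>
      if |t - c| ≤ d then 1 + m2 d ts cs
      else if t < c then m2 d ts (c :: cs)
      else m2 d (t :: ts) cs
termination_by l1 l2 => (l1.length, l2.length)

theorem m2_nil_left (d : Int) (l : List Int) : m2 d [] l = 0 := by cases l <;> simp [m2]

theorem m2_nil_right (d : Int) (l : List Int) : m2 d l [] = 0 := by cases l <;> simp [m2]

def thiefIdx (l : List (Int × String)) : List Int :=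
  l.filterMap (fun p => if p.2 = "THIEF" then some p.1 else none)

def copIdx (l : List (Int × String)) : List Int :=
  l.filterMap (fun p => if p.2 = "COP" then some p.1 else none)

theorem matchA_eq (d : Int) (tc cc : List Int) (fuel ti ci : Nat) (r : Int)
    (hf : (tc.length - ti) + (cc.length - ci) ≤ fuel) :
    matchA d tc cc fuel ti ci r = r + m2 d (tc.drop ti) (cc.drop ci) := by
  induction fuel generalizing ti ci r with
  | zero =>
      have h1 : tc.length ≤ ti := by omega
      have h2 : cc.length ≤ ci := by omega
      rw [matchA, List.drop_eq_nil_of_le h1, m2_nil_left]; omega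
  | succ fuel ih =>
      rw [matchA]
      by_cases h : ti < tc.length ∧ ci < cc.length
      · rw [dif_pos h]
        rw [List.drop_eq_getElem_cons h.1, List.drop_eq_getElem_cons h.2, m2]
        by_cases hle : |tc[ti] - cc[ci]| ≤ d
        · rw [if_pos hle, ih (ti + 1) (ci + 1) (r + 1) (by omega)]
          simp [hle]; omega
        · by_cases hlt : tc[ti] < cc[ci]
          · rw [if_neg hle, if_pos hlt, ih (ti + 1) ci r (by omega),
              List.drop_eq_getElem_cons h.2]
            simp [hle, hlt]
          · rw [if_neg hle, if_neg hlt, ih ti (ci + 1) r (by omega),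
              List.drop_eq_getElem_cons h.1]
            simp [hle, hlt]
      · rw [dif_neg h]
        rcases Nat.lt_or_ge ti tc.length with h1 | h1
        · have h2 : cc.length ≤ ci := by omega
          rw [List.drop_eq_nil_of_le h2, m2_nil_right]; omega
        · rw [List.drop_eq_nil_of_le h1, m2_nil_left]; omega

theorem scanA_eq (array : List String) (fuel i : Nat) (tc cc : List Int)
    (hf : array.length - i ≤ fuel) :
    copsScanA array fuel i tc cc =
      (tc ++ thiefIdx (PySem.List.enumerate (array.drop i) i),
       cc ++ copIdx (PySem.List.enumerate (array.drop i) i)) := by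
  induction fuel generalizing i tc cc with
  | zero =>
      have h1 : array.length ≤ i := by omega
      rw [copsScanA, List.drop_eq_nil_of_le h1]
      simp [PySem.List.enumerate, thiefIdx, copIdx]
  | succ fuel ih =>
      rw [copsScanA]
      by_cases h : i < array.length
      · rw [dif_pos h]
        have hstep : copsScanA array fuel (i + 1) = fun tc cc =>
            (tc ++ thiefIdx (PySem.List.enumerate (array.drop (i + 1)) (i + 1)),
             cc ++ copIdx (PySem.List.enumerate (array.drop (i + 1)) (i + 1))) := by
          funext tc cc; exact ih (i + 1) tc cc (by omega)
        have hcast : ((i + 1 : Nat) : Int) = (i : Int) + 1 := by push_cast; ring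
        rw [List.drop_eq_getElem_cons h, PySem.List.enumerate_cons, ← hcast]
        by_cases hcop : array[i] = "COP"
        · rw [if_pos hcop, hstep]
          simp [thiefIdx, copIdx, hcop]
        · by_cases hth : array[i] = "THIEF"
          · rw [if_neg hcop, if_pos hth, hstep]
            simp [thiefIdx, copIdx, hth]
          · rw [if_neg hcop, if_neg hth, hstep]
            simp [thiefIdx, copIdx, hcop, hth]
      · rw [dif_neg h]
        have h1 : array.length ≤ i := by omega
        rw [List.drop_eq_nil_of_le h1]
        simp [PySem.List.enumerate, thiefIdx, copIdx]

-- skip lemmas: stale queued positions are skipped by m2 as well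
theorem m2_skip_thieves (d i : Int) (pre Y C : List Int)
    (h1 : ∀ x ∈ pre, x < i - d) (h2 : ∀ x ∈ pre, x < i) :
    m2 d (pre ++ Y) (i :: C) = m2 d (Y) (i :: C) := by
  induction pre with
  | nil => rfl
  | cons x xs ih =>
      have hx1 := h1 x (by simp)
      have hx2 := h2 x (by simp)
      have habs : ¬ |x - i| ≤ d := by
        have : i - x ≤ |x - i| := by
          have := neg_le_abs (x - i); omega
        omega
      rw [List.cons_append, m2]
      simp only [habs, if_false, hx2, if_true]
      exact ih (fun y hy => h1 y (by simp [hy])) (fun y hy => h2 y (by simp [hy]))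

theorem m2_skip_cops (d i : Int) (pre Y T : List Int)
    (h1 : ∀ x ∈ pre, x < i - d) (h2 : ∀ x ∈ pre, x < i) :
    m2 d (i :: T) (pre ++ Y) = m2 d (i :: T) Y := by
  induction pre with
  | nil => rfl
  | cons x xs ih =>
      have hx1 := h1 x (by simp)
      have hx2 := h2 x (by simp)
      have habs : ¬ |i - x| ≤ d := by
        have : i - x ≤ |i - x| := le_abs_self _
        omega
      have hlt : ¬ i < x := by omega
      rw [List.cons_append, m2]
      simp only [habs, if_false, hlt, if_false]
      exact ih (fun y hy => h1 y (by simp [hy])) (fun y hy => h2 y (by simp [hy]))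

theorem m2_match_thief (d i t : Int) (T C : List Int) (h1 : i - d ≤ t) (h2 : t < i) :
    m2 d (t :: T) (i :: C) = 1 + m2 d T C := by
  have habs : |t - i| ≤ d := by
    rw [abs_of_nonpos (by omega)]; omega
  rw [m2]; simp [habs]

theorem m2_match_cop (d i c : Int) (T C : List Int) (h1 : i - d ≤ c) (h2 : c < i) :
    m2 d (i :: T) (c :: C) = 1 + m2 d T C := by
  have habs : |i - c| ≤ d := by
    rw [abs_of_nonneg (by omega)]; omega
  rw [m2]; simp [habs]

theorem dropWhile_head_false {p : Int → Bool} {l : List Int} {x : Int} {xs : List Int}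
    (h : l.dropWhile p = x :: xs) : p x = false := by
  induction l with
  | nil => simp at h
  | cons y ys ih =>
      rw [List.dropWhile_cons] at h
      by_cases hp : p y
      · simp [hp] at h; exact ih h
      · simp [hp] at h; rw [← h.1]; simpa using hp

-- main invariant for B's single pass
theorem foldB (d : Int) (l : List (Int × String)) :
    ∀ (cq tq : List Int) (r : Int),
    (cq = [] ∨ tq = []) →
    (∀ x ∈ cq, ∀ p ∈ l, x < p.1) →
    (∀ x ∈ tq, ∀ p ∈ l, x < p.1) →
    l.Pairwise (fun p q => p.1 < q.1) →
    (l.foldl (stepB d) (cq, tq, r)).2.2 = r + m2 d (tq ++ thiefIdx l) (cq ++ copIdx l) := by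
  induction l with
  | nil =>
      intro cq tq r hone _ _ _
      rcases hone with h | h <;> subst h <;>
        simp [thiefIdx, copIdx, m2_nil_left, m2_nil_right]
  | cons hd tl ih =>
      intro cq tq r hone hcq htq hpw
      obtain ⟨i, s⟩ := hd
      have hpw' : tl.Pairwise (fun p q => p.1 < q.1) := (List.pairwise_cons.1 hpw).2
      have hi_lt : ∀ p ∈ tl, i < p.1 := fun p hp => (List.pairwise_cons.1 hpw).1 p hp
      have hcq_i : ∀ x ∈ cq, x < i := fun x hx => hcq x hx (i, s) (by simp)
      have htq_i : ∀ x ∈ tq, x < i := fun x hx => htq x hx (i, s) (by simp)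
      have hcq_tl : ∀ x ∈ cq, ∀ p ∈ tl, x < p.1 := fun x hx p hp => hcq x hx p (by simp [hp])
      have htq_tl : ∀ x ∈ tq, ∀ p ∈ tl, x < p.1 := fun x hx p hp => htq x hx p (by simp [hp])
      rw [List.foldl_cons]
      by_cases hs : s = "COP"
      · -- a cop arrives at position i
        have hT : thiefIdx ((i, s) :: tl) = thiefIdx tl := by simp [thiefIdx, hs]
        have hC : copIdx ((i, s) :: tl) = i :: copIdx tl := by simp [copIdx, hs]
        rw [hT, hC]
        have hsplit := List.takeWhile_append_dropWhile (p := fun t => decide (t < i - d)) (l := tq)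
        have hpre1 : ∀ x ∈ tq.takeWhile (fun t => decide (t < i - d)), x < i - d := by
          intro x hx; simpa using List.mem_takeWhile_imp hx
        have hpre2 : ∀ x ∈ tq.takeWhile (fun t => decide (t < i - d)), x < i := by
          intro x hx; exact htq_i x ((List.takeWhile_sublist _).mem hx)
        cases hdw : tq.dropWhile (fun t => decide (t < i - d)) with
        | nil =>
            -- queue of thieves empties: enqueue the cop
            have hall : ∀ x ∈ tq, x < i - d := by
              intro x hx
              have := (List.dropWhile_eq_nil_iff).1 hdw x hx
              simpa using this
            have hstep : stepB d (cq, tq, r) (i, s) = (cq ++ [i], [], r) := by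
              simp [stepB, hs, hdw]
            rw [hstep]
            have hres := ih (cq ++ [i]) [] r (Or.inr rfl)
              (by intro x hx p hp
                  rcases List.mem_append.1 hx with h | h
                  · exact hcq_tl x h p hp
                  · simp at h; subst h; exact hi_lt p hp)
              (by intro x hx; simp at hx) hpw'
            rw [hres]
            rcases hone with hceq | hteq
            · subst hceq
              have hall' : ∀ x ∈ tq, x < i - d := hall
              simp only [List.nil_append]
              rw [m2_skip_thieves d i tq (thiefIdx tl) (copIdx tl) hall' htq_i]
              simp
            · subst hteq
              simp
        | cons t ts =>
            -- match the queued thief t with this cop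
            have hcnil : cq = [] := by
              rcases hone with h | h
              · exact h
              · subst h; simp at hdw
            subst hcnil
            have ht_mem : t ∈ tq := by
              have : t ∈ t :: ts := by simp
              exact ((hdw ▸ List.dropWhile_sublist (l := tq) (p := fun t => decide (t < i - d))).mem this)
            have hts_mem : ∀ x ∈ ts, x ∈ tq := by
              intro x hx
              have : x ∈ t :: ts := by simp [hx]
              exact ((hdw ▸ List.dropWhile_sublist (l := tq) (p := fun t => decide (t < i - d))).mem this)
            have ht_ge : i - d ≤ t := by
              have := dropWhile_head_false hdw; simp at this; omega
            have ht_lt : t < i := htq_i t ht_mem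
            have hstep : stepB d ([], tq, r) (i, s) = ([], ts, r + 1) := by
              simp [stepB, hs, hdw]
            rw [hstep]
            have hres := ih [] ts (r + 1) (Or.inl rfl)
              (by intro x hx; simp at hx)
              (by intro x hx p hp; exact htq_tl x (hts_mem x hx) p hp) hpw'
            rw [hres]
            have hlist : tq ++ thiefIdx tl =
                tq.takeWhile (fun t => decide (t < i - d)) ++ ((t :: ts) ++ thiefIdx tl) := by
              rw [← List.append_assoc, ← hdw, hsplit]
            simp only [List.nil_append]
            rw [hlist, m2_skip_thieves d i _ _ _ hpre1 hpre2]
            rw [List.cons_append, m2_match_thief d i t _ _ ht_ge ht_lt]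
            omega
      · by_cases hs2 : s = "THIEF"
        · -- a thief arrives at position i
          have hT : thiefIdx ((i, s) :: tl) = i :: thiefIdx tl := by simp [thiefIdx, hs2]
          have hC : copIdx ((i, s) :: tl) = copIdx tl := by simp [copIdx, hs2]
          rw [hT, hC]
          have hsplit := List.takeWhile_append_dropWhile (p := fun c => decide (c < i - d)) (l := cq)
          have hpre1 : ∀ x ∈ cq.takeWhile (fun c => decide (c < i - d)), x < i - d := by
            intro x hx; simpa using List.mem_takeWhile_imp hx
          have hpre2 : ∀ x ∈ cq.takeWhile (fun c => decide (c < i - d)), x < i := by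
            intro x hx; exact hcq_i x ((List.takeWhile_sublist _).mem hx)
          cases hdw : cq.dropWhile (fun c => decide (c < i - d)) with
          | nil =>
              have hstep : stepB d (cq, tq, r) (i, s) = ([], tq ++ [i], r) := by
                simp [stepB, hs2, hdw]
              rw [hstep]
              have hres := ih [] (tq ++ [i]) r (Or.inl rfl)
                (by intro x hx; simp at hx)
                (by intro x hx p hp
                    rcases List.mem_append.1 hx with h | h
                    · exact htq_tl x h p hp
                    · simp at h; subst h; exact hi_lt p hp) hpw'
              rw [hres]
              have hall : ∀ x ∈ cq, x < i - d := by
                intro x hx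
                have := (List.dropWhile_eq_nil_iff).1 hdw x hx
                simpa using this
              rcases hone with hceq | hteq
              · subst hceq
                simp
              · subst hteq
                simp only [List.nil_append]
                rw [m2_skip_cops d i cq (copIdx tl) (thiefIdx tl) hall hcq_i]
                simp
          | cons c cs =>
              have htnil : tq = [] := by
                rcases hone with h | h
                · subst h; simp at hdw
                · exact h
              subst htnil
              have hc_mem : c ∈ cq := by
                have : c ∈ c :: cs := by simp
                exact ((hdw ▸ List.dropWhile_sublist (l := cq) (p := fun c => decide (c < i - d))).mem this)
              have hcs_mem : ∀ x ∈ cs, x ∈ cq := by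
                intro x hx
                have : x ∈ c :: cs := by simp [hx]
                exact ((hdw ▸ List.dropWhile_sublist (l := cq) (p := fun c => decide (c < i - d))).mem this)
              have hc_ge : i - d ≤ c := by
                have := dropWhile_head_false hdw; simp at this; omega
              have hc_lt : c < i := hcq_i c hc_mem
              have hstep : stepB d (cq, [], r) (i, s) = (cs, [], r + 1) := by
                simp [stepB, hs2, hdw]
              rw [hstep]
              have hres := ih cs [] (r + 1) (Or.inr rfl)
                (by intro x hx p hp; exact hcq_tl x (hcs_mem x hx) p hp)
                (by intro x hx; simp at hx) hpw'
              rw [hres]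
              have hlist : cq ++ copIdx tl =
                  cq.takeWhile (fun c => decide (c < i - d)) ++ ((c :: cs) ++ copIdx tl) := by
                rw [← List.append_assoc, ← hdw, hsplit]
              simp only [List.nil_append]
              rw [hlist, m2_skip_cops d i _ _ _ hpre1 hpre2]
              rw [List.cons_append, m2_match_cop d i c _ _ hc_ge hc_lt]
              omega
        · have hstep : stepB d (cq, tq, r) (i, s) = (cq, tq, r) := by
            simp [stepB, hs, hs2]
          have hT : thiefIdx ((i, s) :: tl) = thiefIdx tl := by simp [thiefIdx, hs2]
          have hC : copIdx ((i, s) :: tl) = copIdx tl := by simp [copIdx, hs]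
          rw [hstep, hT, hC]
          exact ih cq tq r hone hcq_tl htq_tl hpw'

-- ===== VERDICT (by name: the statement is the Claim_ definition above) =====
theorem cops_and_robbers_spec : Claim_equal_cops_and_robbers := by
  intro array distance _
  unfold Spec_cops_and_robbers cops_and_robbers cops_and_robbers_alt
  rw [scanA_eq array array.length 0 [] [] (by omega)]
  simp only [List.drop_zero, List.nil_append]
  rw [matchA_eq _ _ _ _ _ _ _ (by omega)]
  rw [foldB distance (PySem.List.enumerate array 0) [] [] 0 (Or.inl rfl)
    (by intro x hx; simp at hx) (by intro x hx; simp at hx)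
    (PySem.List.pairwise_lt_enumerate array 0)]
  simp
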